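-- pv_equiv track=rewrite | github.com/t0m3kz/franc | src/validation.py | validate_vpc_groups
-- ===== SOURCE A (Python) =====
-- MIN_VPC_GROUP_MEMBERS = 2
--
-- def validate_vpc_groups(vpcs: list[bool], vpc_groups: list[str]) -> list[str]:
--     """Validate that each vPC group has at least the minimum required number of interfaces.
--
--     Args:
--         vpcs: List of boolean flags indicating if each interface is part of a vPC
--         vpc_groups: List of vPC group names corresponding to each interface
--
--     Returns:
--         List of problematic group names that have too few members
--
--     Raises:
--         ValueError: If vpcs and vpc_groups lists have different lengths
--
--     Examples:
--         >>> validate_vpc_groups([True, True, False], ["group1", "group1", ""])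
--         []
--         >>> validate_vpc_groups([True, False], ["group1", ""])
--         ['group1']
--
--     """
--     if len(vpcs) != len(vpc_groups):
--         msg = f"vpcs and vpc_groups must have same length: {len(vpcs)} != {len(vpc_groups)}"
--         raise ValueError(msg)
--
--     # Count members in each vPC group using Counter for efficiency
--     vpc_group_counts: dict[str, int] = {}
--
--     for is_vpc, group_name in zip(vpcs, vpc_groups, strict=True):
--         group = group_name.strip()
--         # Only count non-empty groups for vPC-enabled interfaces
--         if is_vpc and group:
--             vpc_group_counts[group] = vpc_group_counts.get(group, 0) + 1
--
--     # Return groups with insufficient members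
--     return [group_name for group_name, count in vpc_group_counts.items() if count < MIN_VPC_GROUP_MEMBERS]
-- ===== SOURCE B (Python) =====
-- MIN_VPC_GROUP_MEMBERS = 2
--
-- def validate_vpc_groups(vpcs, vpc_groups):
--     """Staged elimination instead of counting: build the list of qualifying
--     stripped group names, then repeatedly take its head, report it if it has
--     no other occurrence, and strip every occurrence of it from the rest.
--     No dict/set/counter is maintained; order is first appearance."""
--     if len(vpcs) != len(vpc_groups):
--         msg = f"vpcs and vpc_groups must have same length: {len(vpcs)} != {len(vpc_groups)}"
--         raise ValueError(msg)
--
--     qual = [g.strip() for v, g in zip(vpcs, vpc_groups) if v and g.strip()]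
--
--     result = []
--     rest = qual
--     while rest:
--         head, tail = rest[0], rest[1:]
--         if head not in tail:
--             result.append(head)
--         rest = [g for g in tail if g != head]
--     return result
-- ===== Notes on version B (the rewrite author's own statement) =====
-- stated objective: alternative
-- what changed: Replaces the name->count dictionary and the count<2 scan over its items with a counting-free staged elimination: collect the qualifying stripped names, then repeatedly take the head, report it iff it does not reoccur in the remainder, and delete all its occurrences before continuing.
import Mathlib
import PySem

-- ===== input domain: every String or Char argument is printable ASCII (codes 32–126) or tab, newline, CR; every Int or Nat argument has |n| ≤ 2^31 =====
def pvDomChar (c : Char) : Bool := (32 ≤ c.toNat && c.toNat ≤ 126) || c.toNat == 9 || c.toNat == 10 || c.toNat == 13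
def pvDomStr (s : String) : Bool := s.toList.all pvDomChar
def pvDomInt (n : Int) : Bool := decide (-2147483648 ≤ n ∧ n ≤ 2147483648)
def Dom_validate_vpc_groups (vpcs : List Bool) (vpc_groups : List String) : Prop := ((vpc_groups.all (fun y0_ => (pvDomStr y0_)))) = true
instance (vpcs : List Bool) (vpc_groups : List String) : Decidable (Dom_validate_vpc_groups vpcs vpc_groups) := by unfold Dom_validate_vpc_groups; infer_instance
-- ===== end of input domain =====

-- B replaces A's name→count dict with a counting-free staged elimination over the qualifying
-- names; equal return values are proved on all equal-length inputs (both raise ValueError otherwise).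

-- ===== PORT A =====
def MIN_VPC_GROUP_MEMBERS : Int := 2

-- for is_vpc, group_name in zip(...): group = group_name.strip(); if is_vpc and group: counts[group] = counts.get(group,0)+1
def validate_vpc_groups (vpcs : List Bool) (vpc_groups : List String) : List String :=
  let counts : PySem.Dict String Int :=
    (vpcs.zip vpc_groups).foldl
      (fun d p =>
        let group := PySem.Str.strip p.2
        if p.1 && !(group == "") then d.modify group 0 (· + 1) else d)
      PySem.Dict.empty
  counts.items.filterMap (fun p => if p.2 < MIN_VPC_GROUP_MEMBERS then some p.1 else none)

-- ===== PORT B =====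
-- the while loop: head, tail = rest[0], rest[1:]; append head iff head not in tail;
-- rest = [g for g in tail if g != head]
def pvElim : List String → List String
  | [] => []
  | h :: t =>
      (if t.contains h then [] else [h]) ++ pvElim (t.filter (fun g => !(g == h)))
termination_by l => l.length
decreasing_by
  simp only [List.length_unattach, List.length_cons]
  exact Nat.lt_succ_of_le (le_trans (List.length_filter_le _ _) (by rw [List.length_attach]))

-- qual = [g.strip() for v, g in zip(vpcs, vpc_groups) if v and g.strip()]
def validate_vpc_groups_alt (vpcs : List Bool) (vpc_groups : List String) : List String :=
  let qual :=
    (vpcs.zip vpc_groups).filterMap (fun p =>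
      let group := PySem.Str.strip p.2
      if p.1 && !(group == "") then some group else none)
  pvElim qual

-- ===== PRECONDITION & SPEC =====
-- A raises ValueError when the lists have different lengths; B does the same.
def Pre_validate_vpc_groups (vpcs : List Bool) (vpc_groups : List String) : Prop :=
  vpcs.length = vpc_groups.length
instance (vpcs : List Bool) (vpc_groups : List String) : Decidable (Pre_validate_vpc_groups vpcs vpc_groups) := by unfold Pre_validate_vpc_groups; infer_instance

def pvWitness_validate_vpc_groups : List Bool × List String := ([true, false], ["g1", ""])

def Spec_validate_vpc_groups (vpcs : List Bool) (vpc_groups : List String) (out : List String) : Prop := out = validate_vpc_groups_alt vpcs vpc_groups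
instance (vpcs : List Bool) (vpc_groups : List String) (out : List String) : Decidable (Spec_validate_vpc_groups vpcs vpc_groups out) := by unfold Spec_validate_vpc_groups; infer_instance

-- ===== CLAIM =====
def Claim_equal_validate_vpc_groups : Prop := ∀ (vpcs : List Bool) (vpc_groups : List String), Dom_validate_vpc_groups vpcs vpc_groups → Pre_validate_vpc_groups vpcs vpc_groups → Spec_validate_vpc_groups vpcs vpc_groups (validate_vpc_groups vpcs vpc_groups)

-- ===== LEMMAS AND PROOFS =====

-- the qualifying stripped group names, in interface order
def pvQual (l : List (Bool × String)) : List String :=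
  l.filterMap (fun p =>
    let group := PySem.Str.strip p.2
    if p.1 && !(group == "") then some group else none)

theorem pvA_fold_eq (l : List (Bool × String)) (d : PySem.Dict String Int) :
    l.foldl (fun d p =>
        let group := PySem.Str.strip p.2
        if p.1 && !(group == "") then d.modify group 0 (· + 1) else d) d
      = (pvQual l).foldl (fun d x => d.modify x 0 (· + 1)) d := by
  induction l generalizing d with
  | nil => rfl
  | cons a l ih =>
      rw [List.foldl_cons]
      show _ = List.foldl _ d (pvQual (a :: l))
      unfold pvQual
      rw [List.filterMap_cons]
      dsimp only
      by_cases h : (a.1 && !(PySem.Str.strip a.2 == "")) = true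
      · rw [if_pos h, if_pos h, List.foldl_cons]; exact ih _
      · rw [if_neg h, if_neg h]; exact ih _

-- once a is in the accumulator, occurrences of a in the remaining input are skipped
theorem pvFoldl_add_filter (t : List String) (s : PySem.Set String) (a : String) (ha : a ∈ s) :
    t.foldl PySem.Set.add s = (t.filter (fun g => !(g == a))).foldl PySem.Set.add s := by
  induction t generalizing s with
  | nil => rfl
  | cons b t ih =>
      rw [List.foldl_cons, List.filter_cons]
      by_cases hb : b = a
      · subst hb
        have hc : PySem.Set.contains s b = true := (PySem.Set.contains_iff _ _).mpr ha
        have : PySem.Set.add s b = s := by rw [PySem.Set.add, if_pos hc]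
        simp only [beq_self_eq_true, Bool.not_true, if_neg (by simp : ¬ (false = true))]
        rw [this]; exact ih s ha
      · have hbq : (!(b == a)) = true := by simp [hb]
        rw [if_pos hbq, List.foldl_cons]
        exact ih _ (by
          rw [PySem.Set.add]
          split
          · exact ha
          · exact List.mem_append_left _ ha)

-- an element absent from the input stays in front of everything the fold appends
theorem pvFoldl_add_cons (l : List String) (h : String) (s : PySem.Set String)
    (hl : h ∉ l) (hs : h ∉ s) :
    l.foldl PySem.Set.add (h :: s) = h :: l.foldl PySem.Set.add s := by
  induction l generalizing s with
  | nil => rfl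
  | cons b l ih =>
      have hbh : b ≠ h := fun e => hl (e ▸ List.mem_cons_self)
      have hl' : h ∉ l := fun e => hl (List.mem_cons_of_mem _ e)
      rw [List.foldl_cons, List.foldl_cons]
      have hcons : PySem.Set.contains (h :: s) b = PySem.Set.contains s b := by
        rw [Bool.eq_iff_iff, PySem.Set.contains_iff, PySem.Set.contains_iff, List.mem_cons]
        simp [hbh]
      by_cases hc : PySem.Set.contains s b = true
      · have h1 : PySem.Set.add (h :: s) b = h :: s := by
          rw [PySem.Set.add, hcons, if_pos hc]
        have h2 : PySem.Set.add s b = s := by rw [PySem.Set.add, if_pos hc]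
        rw [h1, h2]; exact ih s hl' hs
      · have hcf : PySem.Set.contains s b = false := Bool.eq_false_iff.mpr hc
        have h1 : PySem.Set.add (h :: s) b = h :: (s ++ [b]) := by
          rw [PySem.Set.add, hcons, hcf]; simp
        have h2 : PySem.Set.add s b = s ++ [b] := by rw [PySem.Set.add, hcf]; simp
        rw [h1, h2]
        exact ih _ hl' (by
          intro hm
          rcases List.mem_append.mp hm with hm | hm
          · exact hs hm
          · exact hbh ((List.mem_singleton.mp hm).symm))

-- ofList peels off the head together with all its later occurrences
theorem pvOfList_cons_filter (h : String) (t : List String) :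
    PySem.Set.ofList (h :: t) = h :: PySem.Set.ofList (t.filter (fun g => !(g == h))) := by
  have h0 : PySem.Set.ofList (h :: t) = t.foldl PySem.Set.add [h] := by
    rw [PySem.Set.ofList_eq_foldl, List.foldl_cons]
    rfl
  have hnot : h ∉ t.filter (fun g => !(g == h)) := by
    intro hm
    have := (List.mem_filter.mp hm).2
    simp at this
  rw [h0, pvFoldl_add_filter t [h] h List.mem_cons_self,
      show ([h] : PySem.Set String) = h :: [] from rfl,
      pvFoldl_add_cons _ _ _ hnot (by simp), PySem.Set.ofList_eq_foldl]

-- the head is reported iff it does not reoccur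
theorem hhead_count (h : String) (t : List String) :
    (decide ((h :: t).count h < 2)) = !t.contains h := by
  rw [List.count_cons]
  by_cases hm : h ∈ t
  · have h1 : 1 ≤ t.count h := List.count_pos_iff.mpr hm
    have h2 : t.contains h = true := by simpa using hm
    rw [h2]
    simp
    omega
  · have h0 : t.count h = 0 := List.count_eq_zero.mpr hm
    have h2 : t.contains h = false := by simpa using hm
    rw [h2, h0]
    simp

-- staged elimination computes exactly "first occurrences with total count < 2"
theorem pvElim_eq_filter_aux (n : Nat) : ∀ (qs : List String), qs.length ≤ n →
    pvElim qs = (PySem.Set.ofList qs).filter (fun g => decide (qs.count g < 2)) := by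
  induction n with
  | zero =>
      intro qs hq
      have : qs = [] := List.eq_nil_of_length_eq_zero (Nat.le_zero.mp hq)
      subst this
      rw [show pvElim [] = [] by simp [pvElim], PySem.Set.ofList_nil, List.filter_nil]
  | succ n ih =>
      intro qs hq
      match qs with
      | [] => rw [show pvElim [] = [] by simp [pvElim], PySem.Set.ofList_nil, List.filter_nil]
      | h :: t =>
        rw [pvElim, pvOfList_cons_filter, List.filter_cons]
        set t' := t.filter (fun g => !(g == h)) with ht'
        have hlen : t'.length ≤ n := by
          rw [ht']
          have hle := List.length_filter_le (fun g => !(g == h)) t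
          simp only [List.length_cons] at hq
          omega
        have hrest : (PySem.Set.ofList t').filter (fun g => decide ((h :: t).count g < 2))
            = (PySem.Set.ofList t').filter (fun g => decide (t'.count g < 2)) := by
          apply List.filter_congr
          intro g hg
          have hgt' : g ∈ t' := (PySem.Set.mem_ofList _ _).mp hg
          have hgh : ¬ g = h := by
            have := (List.mem_filter.mp hgt').2; simpa using this
          have hhg : ¬ h = g := fun e => hgh e.symm
          have hc1 : (h :: t).count g = t.count g := by simp [hhg]
          have hc2 : t'.count g = t.count g := by
            rw [ht', List.count_filter]; simp [hgh]
          rw [hc1, ← hc2]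
        by_cases hm : t.contains h = true
        · have hcnt : ¬ (decide ((h :: t).count h < 2) = true) := by
            rw [hhead_count h t, hm]; simp
          rw [if_neg hcnt, hrest, ← ih t' hlen, hm]
          simp
        · have hmf : t.contains h = false := Bool.eq_false_iff.mpr hm
          have hcnt : (decide ((h :: t).count h < 2) = true) := by
            rw [hhead_count h t, hmf]; rfl
          rw [if_pos hcnt, hrest, ← ih t' hlen, hmf]
          simp

theorem pvElim_eq_filter (qs : List String) :
    pvElim qs = (PySem.Set.ofList qs).filter (fun g => decide (qs.count g < 2)) :=
  pvElim_eq_filter_aux qs.length qs le_rfl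

theorem pvFilterMap_ite_eq_filter {α : Type} (l : List α) (p : α → Prop) [DecidablePred p]
    (q : α → Bool) (h : ∀ x ∈ l, (p x ↔ q x = true)) :
    l.filterMap (fun x => if p x then some x else none) = l.filter q := by
  induction l with
  | nil => rfl
  | cons a l ih =>
      rw [List.filterMap_cons, List.filter_cons]
      have ha := h a List.mem_cons_self
      have ihl := ih (fun x hx => h x (List.mem_cons_of_mem _ hx))
      by_cases hp : p a
      · rw [if_pos hp, if_pos (ha.mp hp), ihl]
      · have hq : q a = false := by
          cases hqa : q a
          · rfl
          · exact absurd (ha.mpr hqa) hp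
        rw [if_neg hp, hq, ihl]
        simp

-- ===== VERDICT =====
theorem validate_vpc_groups_spec : Claim_equal_validate_vpc_groups := by
  intro vpcs vpc_groups _ _
  unfold Spec_validate_vpc_groups validate_vpc_groups validate_vpc_groups_alt
  rw [pvA_fold_eq]
  set qs := pvQual (vpcs.zip vpc_groups) with hqs
  rw [← PySem.Dict.counter_eq_foldl]
  show List.filterMap (fun p => if p.2 < MIN_VPC_GROUP_MEMBERS then some p.1 else none)
        (PySem.Dict.counter qs).items = pvElim qs
  rw [PySem.Dict.items_counter, List.filterMap_map, pvElim_eq_filter]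
  apply pvFilterMap_ite_eq_filter
  intro k hk
  unfold MIN_VPC_GROUP_MEMBERS
  simp only [decide_eq_true_eq]
  constructor
  · intro hlt
    exact_mod_cast hlt
  · intro hb
    exact_mod_cast hb
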